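-- pv_equiv track=rewrite | github.com/user5427/MathAintMathing | T01/math3.py | shiftOccupation
-- ===== SOURCE A (Python) =====
-- def shiftOccupation(seats, watchers):
--     if watchers == []:
--         return []
--
--     lastWatcher = watchers[-1]
--     if lastWatcher >= seats-1:
--         backwardsShift = shiftOccupation(seats, watchers[:-1])
--         if backwardsShift == []:
--             return []
--         backwardsShift.append(0)
--         return backwardsShift
--     else:
--         watchers[-1] += 1
--         return watchers
-- ===== SOURCE B (Python) =====
-- def shiftOccupation(seats, watchers):
--     # Single iterative pass from the least-significant end: pop full positions,
--     # count them as zeros, increment the first position that has room.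
--     # Return-value equivalence only: A mutates watchers in place in the
--     # non-overflow case; B never mutates its argument.
--     rest = list(watchers)
--     zeros = 0
--     while rest:
--         w = rest.pop()
--         if w < seats - 1:
--             return rest + [w + 1] + [0] * zeros
--         zeros += 1
--     return []
-- ===== Notes on version B (the rewrite author's own statement) =====
-- stated objective: alternative
-- what changed: Replaces A's recursion (which re-slices the list and re-appends a 0 at every overflow level) with one iterative pop-from-the-end loop that counts overflowed positions and rebuilds the result once.
import Mathlib
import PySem

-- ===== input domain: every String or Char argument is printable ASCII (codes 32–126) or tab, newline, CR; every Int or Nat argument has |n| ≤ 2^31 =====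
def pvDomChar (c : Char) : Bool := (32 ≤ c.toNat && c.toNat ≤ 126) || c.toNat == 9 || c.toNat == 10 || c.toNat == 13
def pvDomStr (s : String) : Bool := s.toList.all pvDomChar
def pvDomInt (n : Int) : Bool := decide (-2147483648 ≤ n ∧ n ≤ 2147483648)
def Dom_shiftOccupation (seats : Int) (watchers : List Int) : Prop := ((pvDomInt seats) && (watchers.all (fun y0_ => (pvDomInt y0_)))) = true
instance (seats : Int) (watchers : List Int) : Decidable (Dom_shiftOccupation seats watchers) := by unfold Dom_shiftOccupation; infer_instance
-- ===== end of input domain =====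

-- B replaces A's recursion-with-slices by one iterative pop-from-the-end pass (return-value
-- equivalence: A mutates watchers in place in the non-overflow case, B does not).

-- ===== PORT A =====
-- Literal transliteration of A: recursion on watchers[:-1]; `watchers[-1] += 1; return watchers`
-- is rendered by its value watchers.dropLast ++ [lastWatcher + 1].
def shiftOccupation (seats : Int) (watchers : List Int) : List Int :=
  if h : watchers = [] then []
  else
    let lastWatcher := watchers.getLast h
    if lastWatcher ≥ seats - 1 then
      let backwardsShift := shiftOccupation seats watchers.dropLast
      if backwardsShift = [] then []
      else backwardsShift ++ [0]
    else
      watchers.dropLast ++ [lastWatcher + 1]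
termination_by watchers.length
decreasing_by
  simp [List.length_dropLast]
  exact List.length_pos_iff.mpr h

-- ===== PORT B =====
-- `while rest: w = rest.pop(); …` as recursion on rest (pop from the end = getLast/dropLast).
def shiftOccupationAltGo (seats : Int) (zeros : Nat) (rest : List Int) : List Int :=
  if h : rest = [] then []
  else
    let w := rest.getLast h
    if w < seats - 1 then rest.dropLast ++ [w + 1] ++ List.replicate zeros 0
    else shiftOccupationAltGo seats (zeros + 1) rest.dropLast
termination_by rest.length
decreasing_by
  simp [List.length_dropLast]
  exact List.length_pos_iff.mpr h

def shiftOccupation_alt (seats : Int) (watchers : List Int) : List Int :=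
  shiftOccupationAltGo seats 0 watchers

-- ===== PRECONDITION & SPEC =====
def Spec_shiftOccupation (seats : Int) (watchers : List Int) (out : List Int) : Prop := out = shiftOccupation_alt seats watchers
instance (seats : Int) (watchers : List Int) (out : List Int) : Decidable (Spec_shiftOccupation seats watchers out) := by unfold Spec_shiftOccupation; infer_instance

-- ===== CLAIM (what is proved, stated in full; the proofs are below) =====
def Claim_equal_shiftOccupation : Prop := ∀ (seats : Int) (watchers : List Int), Dom_shiftOccupation seats watchers → Spec_shiftOccupation seats watchers (shiftOccupation seats watchers)

-- ===== LEMMAS AND PROOFS =====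

theorem shiftOccupation_concat (seats w : Int) (xs : List Int) :
    shiftOccupation seats (xs ++ [w]) =
      if w ≥ seats - 1 then
        (if shiftOccupation seats xs = [] then [] else shiftOccupation seats xs ++ [0])
      else xs ++ [w + 1] := by
  rw [shiftOccupation.eq_def]
  simp [List.dropLast_concat, List.getLast_concat]

theorem shiftOccupationAltGo_concat (seats w : Int) (zeros : Nat) (xs : List Int) :
    shiftOccupationAltGo seats zeros (xs ++ [w]) =
      if w < seats - 1 then xs ++ [w + 1] ++ List.replicate zeros 0
      else shiftOccupationAltGo seats (zeros + 1) xs := by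
  rw [shiftOccupationAltGo.eq_def]
  simp [List.dropLast_concat, List.getLast_concat]

theorem shiftOccupationAltGo_eq (seats : Int) (l : List Int) :
    ∀ zeros : Nat, shiftOccupationAltGo seats zeros l =
      if shiftOccupation seats l = [] then []
      else shiftOccupation seats l ++ List.replicate zeros 0 := by
  induction l using List.reverseRecOn with
  | nil => intro zeros; rw [shiftOccupationAltGo.eq_def, shiftOccupation.eq_def]; simp
  | append_singleton xs w ih =>
    intro zeros
    rw [shiftOccupation_concat, shiftOccupationAltGo_concat]
    by_cases hw : w < seats - 1
    · simp [hw, not_le.mpr hw]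
    · rw [if_neg hw, if_pos (not_lt.mp hw), ih]
      by_cases hA : shiftOccupation seats xs = []
      · simp [hA]
      · simp [hA, List.replicate_succ, List.append_assoc]

-- ===== VERDICT (by name: the statement is the Claim_ definition above) =====
theorem shiftOccupation_spec : Claim_equal_shiftOccupation := by
  intro seats watchers _
  unfold Spec_shiftOccupation shiftOccupation_alt
  rw [shiftOccupationAltGo_eq]
  by_cases hA : shiftOccupation seats watchers = [] <;> simp [hA]
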